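-- pv_equiv track=rewrite | github.com/Se7enSquared/PyBitesRepo | 72/belt.py | get_belt
-- ===== SOURCE A (Python) =====
-- scores = [10, 50, 100, 175, 250, 400, 600, 800, 1000]
--
-- belts = 'white yellow orange green blue brown black paneled red'.split()
--
-- def get_belt(user_score, scores=scores, belts=belts):
--     score_zip = zip(scores, belts)
--     max_belt =  None
--     for belt in list(score_zip):
--         if user_score >= int(belt[0]):
--             max_belt = belt[1]
--             continue
--     return max_belt
-- ===== SOURCE B (Python) =====
-- scores = [10, 50, 100, 175, 250, 400, 600, 800, 1000]
--
-- belts = 'white yellow orange green blue brown black paneled red'.split()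
--
-- def get_belt(user_score, scores=scores, belts=belts):
--     for score, belt in reversed(list(zip(scores, belts))):
--         if user_score >= int(score):
--             return belt
--     return None
-- ===== Notes on version B (the rewrite author's own statement) =====
-- stated objective: simpler
-- what changed: Instead of scanning all pairs forward and keeping the last qualifying belt in an accumulator, B walks the zipped pairs in reverse and returns the belt at the first qualifying pair (the last qualifying pair of the forward order), with early exit and no accumulator.
import Mathlib
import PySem

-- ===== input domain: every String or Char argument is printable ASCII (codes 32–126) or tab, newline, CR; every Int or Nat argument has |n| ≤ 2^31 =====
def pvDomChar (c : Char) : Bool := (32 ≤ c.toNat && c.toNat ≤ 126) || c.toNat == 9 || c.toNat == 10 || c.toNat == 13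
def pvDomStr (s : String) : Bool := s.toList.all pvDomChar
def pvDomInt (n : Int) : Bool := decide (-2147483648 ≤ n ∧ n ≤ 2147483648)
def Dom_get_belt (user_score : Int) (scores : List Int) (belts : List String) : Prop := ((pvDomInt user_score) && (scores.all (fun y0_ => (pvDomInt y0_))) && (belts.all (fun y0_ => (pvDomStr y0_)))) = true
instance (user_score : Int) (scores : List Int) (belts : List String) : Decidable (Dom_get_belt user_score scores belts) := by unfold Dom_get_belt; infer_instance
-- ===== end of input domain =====

-- ===== PORT A =====
-- Header: B returns the same belt by scanning the zipped pairs in reverse and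
-- returning at the first qualifying pair, instead of A's forward accumulator loop.
def get_belt (user_score : Int) (scores : List Int) (belts : List String) : Option String :=
  (List.zip scores belts).foldl
    (fun max_belt belt => if user_score ≥ belt.1 then some belt.2 else max_belt) none

-- ===== PORT B =====
def pvFirstQual (user_score : Int) : List (Int × String) → Option String
  | [] => none
  | p :: rest => if user_score ≥ p.1 then some p.2 else pvFirstQual user_score rest

def get_belt_alt (user_score : Int) (scores : List Int) (belts : List String) : Option String :=
  pvFirstQual user_score (List.zip scores belts).reverse

-- ===== PRECONDITION & SPEC =====
def Spec_get_belt (user_score : Int) (scores : List Int) (belts : List String) (out : Option String) : Prop := out = get_belt_alt user_score scores belts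
instance (user_score : Int) (scores : List Int) (belts : List String) (out : Option String) : Decidable (Spec_get_belt user_score scores belts out) := by unfold Spec_get_belt; infer_instance

-- ===== CLAIM (what is proved, stated in full; the proofs are below) =====
def Claim_equal_get_belt : Prop := ∀ (user_score : Int) (scores : List Int) (belts : List String), Dom_get_belt user_score scores belts → Spec_get_belt user_score scores belts (get_belt user_score scores belts)

-- ===== LEMMAS AND PROOFS =====

-- ===== VERDICT (by name: the statement is the Claim_ definition above) =====
theorem pvFirstQual_append (u : Int) (xs : List (Int × String)) (p : Int × String) :
    pvFirstQual u (xs ++ [p]) =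
      Option.or (pvFirstQual u xs) (if u ≥ p.1 then some p.2 else none) := by
  induction xs with
  | nil => simp [pvFirstQual]
  | cons q rest ih => simp only [List.cons_append, pvFirstQual]; split <;> simp [ih]

theorem pv_fold_eq (u : Int) (l : List (Int × String)) (acc : Option String) :
    l.foldl (fun max_belt belt => if u ≥ belt.1 then some belt.2 else max_belt) acc =
      Option.or (pvFirstQual u l.reverse) acc := by
  induction l generalizing acc with
  | nil => simp [pvFirstQual]
  | cons p rest ih =>
      simp only [List.foldl_cons, ih, List.reverse_cons, pvFirstQual_append, Option.or_assoc]
      congr 1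
      split <;> simp

theorem get_belt_spec : Claim_equal_get_belt := by
  intro u s b _
  unfold Spec_get_belt get_belt get_belt_alt
  simp [pv_fold_eq]
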